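-- pv_equiv track=rewrite | github.com/HCC-Lab-Aarhus/manufacturerAI | src/pcb_python/ts_router_bridge.py | _generate_controller_pins
-- ===== SOURCE A (Python) =====
-- from typing import Dict, List
--
-- def _generate_controller_pins(button_count: int, led_components: List[dict] = None) -> Dict[str, str]:
--     """Generate controller pin assignments for buttons and LEDs."""
--     pins = {
--         "VCC": "VCC",
--         "GND1": "GND",
--         "GND2": "GND",
--         "AVCC": "VCC",
--         "AREF": "NC"
--     }
--
--     # Available I/O pins
--     io_pins = ["PD0", "PD1", "PD2", "PD3", "PD4", "PD5", "PD6", "PD7",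
--                "PB0", "PB1", "PB2", "PB3", "PB4", "PB5",
--                "PC0", "PC1", "PC2", "PC3", "PC4", "PC5"]
--
--     pin_index = 0
--
--     # Assign pins to buttons first
--     for i in range(button_count):
--         if pin_index < len(io_pins):
--             pins[io_pins[pin_index]] = f"SW{i+1}_SIG"
--             pin_index += 1
--
--     # Assign pins to LEDs
--     if led_components:
--         for led in led_components:
--             if pin_index < len(io_pins):
--                 led_id = led.get("id", f"LED{pin_index}")
--                 pins[io_pins[pin_index]] = f"{led_id}_SIG"
--                 pin_index += 1
--
--     # Mark remaining pins as NC
--     while pin_index < len(io_pins):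
--         pins[io_pins[pin_index]] = "NC"
--         pin_index += 1
--
--     # Unused pins
--     for pin in ["PC6", "PB6", "PB7"]:
--         pins[pin] = "NC"
--
--     return pins
-- ===== SOURCE B (Python) =====
-- def _generate_controller_pins(button_count, led_components=None):
--     """Generate controller pin assignments: build the (pin, signal) pairs as an
--     association list by structural recursion over the I/O pin list, consuming the
--     LED list as it goes, then materialize a dict once at the end."""
--     io_pins = ["PD0", "PD1", "PD2", "PD3", "PD4", "PD5", "PD6", "PD7",
--                "PB0", "PB1", "PB2", "PB3", "PB4", "PB5",
--                "PC0", "PC1", "PC2", "PC3", "PC4", "PC5"]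
--
--     def signals(pins, j, leds):
--         if not pins:
--             return []
--         head, rest = pins[0], pins[1:]
--         if j < button_count:
--             return [(head, f"SW{j+1}_SIG")] + signals(rest, j + 1, leds)
--         if leds:
--             led, more = leds[0], leds[1:]
--             return [(head, f"{led.get('id', f'LED{j}')}_SIG")] + signals(rest, j + 1, more)
--         return [(head, "NC")] + signals(rest, j + 1, leds)
--
--     items = [("VCC", "VCC"), ("GND1", "GND"), ("GND2", "GND"),
--              ("AVCC", "VCC"), ("AREF", "NC")]
--     items += signals(io_pins, 0, led_components or [])
--     items += [("PC6", "NC"), ("PB6", "NC"), ("PB7", "NC")]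
--     return dict(items)
-- ===== Notes on version B (the rewrite author's own statement) =====
-- stated objective: alternative
-- what changed: Instead of mutating a dict through three sequential loops synchronized by a shared pin_index cursor, B builds the (pin, signal) pairs as an immutable association list by one structural recursion that consumes the I/O-pin list and the LED list together (no cursor, no range loop, no NC-fill pass), and materializes a dict once at the end with dict(items).
import Mathlib
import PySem

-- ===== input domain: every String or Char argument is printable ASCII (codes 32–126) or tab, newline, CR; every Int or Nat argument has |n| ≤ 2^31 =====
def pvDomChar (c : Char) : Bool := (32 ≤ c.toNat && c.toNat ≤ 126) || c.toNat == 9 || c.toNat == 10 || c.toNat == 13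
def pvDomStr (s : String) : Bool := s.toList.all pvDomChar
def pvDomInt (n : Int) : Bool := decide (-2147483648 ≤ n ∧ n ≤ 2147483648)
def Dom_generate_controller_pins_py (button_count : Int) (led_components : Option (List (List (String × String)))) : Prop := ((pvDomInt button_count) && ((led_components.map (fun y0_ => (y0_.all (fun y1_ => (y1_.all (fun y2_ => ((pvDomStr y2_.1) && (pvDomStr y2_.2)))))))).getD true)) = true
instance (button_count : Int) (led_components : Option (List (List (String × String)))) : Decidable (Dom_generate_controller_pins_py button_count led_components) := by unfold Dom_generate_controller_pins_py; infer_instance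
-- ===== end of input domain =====

-- B builds the (pin, signal) pairs as an immutable association list by one structural
-- recursion consuming the pin list and the LED list together, then dict(items) once;
-- A mutates a dict through three loops sharing a pin_index cursor (objective: alternative).
-- Return value only; neither version mutates its arguments.

-- ===== PORT A =====
-- the fixed I/O pin list and base entries shared verbatim by both Python versions
def pvIoPins : List String :=
  ["PD0", "PD1", "PD2", "PD3", "PD4", "PD5", "PD6", "PD7",
   "PB0", "PB1", "PB2", "PB3", "PB4", "PB5",
   "PC0", "PC1", "PC2", "PC3", "PC4", "PC5"]

def pvBaseItems : List (String × String) :=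
  [("VCC", "VCC"), ("GND1", "GND"), ("GND2", "GND"), ("AVCC", "VCC"), ("AREF", "NC")]

def pvBase : PySem.Dict String String := PySem.Dict.ofList pvBaseItems

-- body of A's button loop: 'if pin_index < len(io_pins): pins[io_pins[pin_index]] = f"SW{i+1}_SIG"; pin_index += 1'
def pvButtonStep (st : PySem.Dict String String × Int) (i : Int) : PySem.Dict String String × Int :=
  if st.2 < PySem.List.len pvIoPins then
    (st.1.insert (PySem.List.pyGetD pvIoPins st.2 "") ("SW" ++ PySem.Int.toStr (i + 1) ++ "_SIG"), st.2 + 1)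
  else st

-- body of A's LED loop: 'led_id = led.get("id", f"LED{pin_index}"); pins[io_pins[pin_index]] = f"{led_id}_SIG"; pin_index += 1'
def pvLedStep (st : PySem.Dict String String × Int) (led : List (String × String)) : PySem.Dict String String × Int :=
  if st.2 < PySem.List.len pvIoPins then
    (st.1.insert (PySem.List.pyGetD pvIoPins st.2 "")
      ((PySem.Dict.mk led).getD "id" ("LED" ++ PySem.Int.toStr st.2) ++ "_SIG"), st.2 + 1)
  else st

-- A's 'while pin_index < len(io_pins): pins[io_pins[pin_index]] = "NC"; pin_index += 1'
def pvWhileNC (pins : PySem.Dict String String) (pin_index : Int) : PySem.Dict String String :=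
  if h : pin_index < PySem.List.len pvIoPins then
    pvWhileNC (pins.insert (PySem.List.pyGetD pvIoPins pin_index "") "NC") (pin_index + 1)
  else pins
termination_by (PySem.List.len pvIoPins - pin_index).toNat
decreasing_by simp only [PySem.List.len_eq] at *; omega

def generate_controller_pins_py (button_count : Int) (led_components : Option (List (List (String × String)))) : List (String × String) :=
  let pins := pvBase
  let s1 := (PySem.List.pyRange 0 button_count 1).foldl pvButtonStep (pins, (0 : Int))
  let s2 := match led_components with
    | none => s1
    | some ls => if ls.isEmpty then s1 else ls.foldl pvLedStep s1
  let pins2 := pvWhileNC s2.1 s2.2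
  let pins3 := ["PC6", "PB6", "PB7"].foldl (fun d p => d.insert p "NC") pins2
  pins3.items

-- ===== PORT B =====
-- Source B's inner 'signals(pins, j, leds)': structural recursion on the pin list,
-- consuming the LED list; 'pins[0]/pins[1:]', 'leds[0]/leds[1:]' are head/tail
def pvSignals (bc : Int) : List String → Int → List (List (String × String)) → List (String × String)
  | [], _, _ => []
  | head :: rest, j, leds =>
    if j < bc then
      (head, "SW" ++ PySem.Int.toStr (j + 1) ++ "_SIG") :: pvSignals bc rest (j + 1) leds
    else
      match leds with
      | led :: more =>
        (head, (PySem.Dict.mk led).getD "id" ("LED" ++ PySem.Int.toStr j) ++ "_SIG")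
          :: pvSignals bc rest (j + 1) more
      | [] => (head, "NC") :: pvSignals bc rest (j + 1) []

def generate_controller_pins_py_alt (button_count : Int) (led_components : Option (List (List (String × String)))) : List (String × String) :=
  let items := pvBaseItems
    ++ pvSignals button_count pvIoPins 0 (led_components.getD [])
    ++ [("PC6", "NC"), ("PB6", "NC"), ("PB7", "NC")]
  (PySem.Dict.ofList items).items

-- ===== PRECONDITION & SPEC =====
def Spec_generate_controller_pins_py (button_count : Int) (led_components : Option (List (List (String × String)))) (out : List (String × String)) : Prop := out = generate_controller_pins_py_alt button_count led_components
instance (button_count : Int) (led_components : Option (List (List (String × String)))) (out : List (String × String)) : Decidable (Spec_generate_controller_pins_py button_count led_components out) := by unfold Spec_generate_controller_pins_py; infer_instance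

-- ===== CLAIM (what is proved, stated in full; the proofs are below) =====
def Claim_equal_generate_controller_pins_py : Prop := ∀ (button_count : Int) (led_components : Option (List (List (String × String)))), Dom_generate_controller_pins_py button_count led_components → Spec_generate_controller_pins_py button_count led_components (generate_controller_pins_py button_count led_components)

-- ===== LEMMAS AND PROOFS =====

lemma pv_len : PySem.List.len pvIoPins = 20 := by decide

-- canonical shape: one insert per index of [a, b)
def pvC (a b : Int) (V : Int → String) (d : PySem.Dict String String) : PySem.Dict String String :=
  (PySem.List.pyRange a b 1).foldl (fun d j => d.insert (PySem.List.pyGetD pvIoPins j "") (V j)) d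

def pvSW (j : Int) : String := "SW" ++ PySem.Int.toStr (j + 1) ++ "_SIG"

def pvLedVal (ls : List (List (String × String))) (s : Int) (j : Int) : String :=
  (PySem.Dict.mk (PySem.List.pyGetD ls (j - s) [])).getD "id" ("LED" ++ PySem.Int.toStr j) ++ "_SIG"

-- the one value function both programs realize (nb buttons, then leds, then NC)
def pvG (bc m : Int) (ls : List (List (String × String))) (i : Int) : String :=
  if i < bc then pvSW i
  else if i - m < ((ls.length : Nat) : Int) then pvLedVal ls m i
  else "NC"

-- Source B's signals list, pin value written as a function of the pin's index
def pvSpecList : List String → Int → (Int → String) → List (String × String)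
  | [], _, _ => []
  | p :: rest, j, V => (p, V j) :: pvSpecList rest (j + 1) V

lemma pv_getD_cons {α : Type} (x : α) (tl : List α) (i : Int) (dfl : α) (h : 1 ≤ i) :
    PySem.List.pyGetD (x :: tl) i dfl = PySem.List.pyGetD tl (i - 1) dfl := by
  obtain ⟨n, rfl⟩ : ∃ n : Nat, i = ((n + 1 : Nat) : Int) := ⟨(i - 1).toNat, by omega⟩
  have h1 : ((n + 1 : Nat) : Int) - 1 = ((n : Nat) : Int) := by push_cast; ring
  rw [h1, PySem.List.pyGetD_natCast, PySem.List.pyGetD_natCast, List.getD_cons_succ]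

lemma pv_bstep_go (D : PySem.Dict String String) (idx i : Int) (h : idx < 20) :
    pvButtonStep (D, idx) i
      = (D.insert (PySem.List.pyGetD pvIoPins idx "") ("SW" ++ PySem.Int.toStr (i + 1) ++ "_SIG"), idx + 1) := by
  simp only [pvButtonStep, pv_len]
  rw [if_pos h]

lemma pv_bstep_stuck (D : PySem.Dict String String) (idx i : Int) (h : ¬ idx < 20) :
    pvButtonStep (D, idx) i = (D, idx) := by
  simp only [pvButtonStep, pv_len]
  rw [if_neg h]

lemma pv_button (n : Nat) (d : PySem.Dict String String) :
    (PySem.List.pyRange 0 (n : Int) 1).foldl pvButtonStep (d, (0 : Int))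
      = (pvC 0 (min (n : Int) 20) pvSW d, min (n : Int) 20) := by
  induction n with
  | zero =>
    have h0 : ((0 : Nat) : Int) = 0 := rfl
    rw [h0, PySem.List.pyRange_one_eq_nil (le_refl 0)]
    have hm : min (0 : Int) 20 = 0 := by omega
    rw [hm]
    simp only [pvC, PySem.List.pyRange_one_eq_nil (le_refl (0 : Int)), List.foldl_nil]
  | succ n ih =>
    have hc : ((n + 1 : Nat) : Int) = (n : Int) + 1 := by push_cast; ring
    rw [hc, PySem.List.pyRange_one_succ_right (by positivity), List.foldl_append, ih]
    by_cases h : (n : Int) < 20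
    · have hmn : min ((n : Int)) 20 = (n : Int) := by omega
      have hmn1 : min ((n : Int) + 1) 20 = (n : Int) + 1 := by omega
      rw [hmn, hmn1, List.foldl_cons, List.foldl_nil, pv_bstep_go _ _ _ h]
      simp only [pvC]
      rw [PySem.List.pyRange_one_succ_right (by positivity : (0:Int) ≤ (n : Int)), List.foldl_append,
          List.foldl_cons, List.foldl_nil]
      simp only [pvSW]
    · have hmn : min ((n : Int)) 20 = 20 := by omega
      have hmn1 : min ((n : Int) + 1) 20 = 20 := by omega
      rw [hmn, hmn1, List.foldl_cons, List.foldl_nil, pv_bstep_stuck _ _ _ (by omega)]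

lemma pv_buttonI (b : Int) (d : PySem.Dict String String) :
    (PySem.List.pyRange 0 b 1).foldl pvButtonStep (d, (0 : Int))
      = (pvC 0 (min (max b 0) 20) pvSW d, min (max b 0) 20) := by
  by_cases hb : b ≤ 0
  · have hm : min (max b 0) 20 = 0 := by omega
    rw [hm, PySem.List.pyRange_one_eq_nil hb]
    simp only [pvC, PySem.List.pyRange_one_eq_nil (le_refl (0 : Int)), List.foldl_nil]
  · obtain ⟨n, rfl⟩ : ∃ n : Nat, b = (n : Int) := ⟨b.toNat, by omega⟩
    have hm : max ((n : Int)) 0 = (n : Int) := by omega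
    rw [hm, pv_button]

lemma pv_led_stuck (ls : List (List (String × String))) (d : PySem.Dict String String)
    (idx : Int) (h : ¬ idx < 20) : ls.foldl pvLedStep (d, idx) = (d, idx) := by
  induction ls with
  | nil => rfl
  | cons x tl ih =>
    simp only [List.foldl_cons, pvLedStep, pv_len]
    rw [if_neg h]
    exact ih

lemma pv_led (ls : List (List (String × String))) (idx : Int) (d : PySem.Dict String String)
    (h0 : 0 ≤ idx) (h1 : idx ≤ 20) :
    ls.foldl pvLedStep (d, idx)
      = (pvC idx (idx + min ((ls.length : Int)) (20 - idx)) (pvLedVal ls idx) d,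
         idx + min ((ls.length : Int)) (20 - idx)) := by
  induction ls generalizing idx d with
  | nil =>
    have hm : idx + min (((([] : List (List (String × String))).length : Nat) : Int)) (20 - idx) = idx := by
      simp only [List.length_nil, Nat.cast_zero]; omega
    rw [List.foldl_nil, hm]
    simp only [pvC, PySem.List.pyRange_one_eq_nil (le_refl idx), List.foldl_nil]
  | cons x tl ih =>
    by_cases h : idx < 20
    · have hlen : (((x :: tl).length : Nat) : Int) = (tl.length : Int) + 1 := by
        simp only [List.length_cons]; push_cast; ring
      have hm : idx + min ((tl.length : Int) + 1) (20 - idx)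
          = (idx + 1) + min ((tl.length : Int)) (20 - (idx + 1)) := by omega
      simp only [List.foldl_cons, pvLedStep, pv_len]
      rw [if_pos h, ih (idx + 1) _ (by omega) (by omega), hlen, hm]
      congr 1
      simp only [pvC]
      rw [PySem.List.pyRange_one_cons (by omega :
        idx < (idx + 1) + min ((tl.length : Int)) (20 - (idx + 1)))]
      simp only [List.foldl_cons]
      have hv : pvLedVal (x :: tl) idx idx
          = (PySem.Dict.mk x).getD "id" ("LED" ++ PySem.Int.toStr idx) ++ "_SIG" := by
        simp only [pvLedVal, sub_self, PySem.List.pyGetD_zero_cons]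
      rw [hv]
      apply PySem.List.foldl_congr_mem
      intro acc j hj
      rw [PySem.List.mem_pyRange_one] at hj
      have hvv : pvLedVal tl (idx + 1) j = pvLedVal (x :: tl) idx j := by
        simp only [pvLedVal]
        rw [pv_getD_cons x tl (j - idx) [] (by omega),
            (by omega : j - idx - 1 = j - (idx + 1))]
      rw [hvv]
    · have hidx : idx = 20 := by omega
      subst hidx
      have hm : (20 : Int) + min ((((x :: tl).length : Nat) : Int)) (20 - 20) = 20 := by
        have := Int.natCast_nonneg ((x :: tl).length)
        omega
      rw [pv_led_stuck _ _ _ (by omega), hm]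
      simp only [pvC, PySem.List.pyRange_one_eq_nil (le_refl (20 : Int)), List.foldl_nil]

lemma pv_while (n : Nat) : ∀ (idx : Int) (d : PySem.Dict String String),
    ((20 : Int) - idx).toNat = n →
    pvWhileNC d idx = pvC idx 20 (fun _ => "NC") d := by
  induction n with
  | zero =>
    intro idx d hn
    rw [pvWhileNC, dif_neg (by rw [pv_len]; omega)]
    simp only [pvC, PySem.List.pyRange_one_eq_nil (by omega : (20 : Int) ≤ idx), List.foldl_nil]
  | succ n ih =>
    intro idx d hn
    rw [pvWhileNC]
    by_cases h : idx < 20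
    · rw [dif_pos (by rw [pv_len]; exact h), ih (idx + 1) _ (by omega)]
      simp only [pvC]
      rw [PySem.List.pyRange_one_cons h]
      simp only [List.foldl_cons]
    · omega

lemma pv_glue (nb nl : Int) (ls : List (List (String × String)))
    (hnb0 : 0 ≤ nb) (hnb1 : nb ≤ 20) (hnl0 : 0 ≤ nl) (hnl1 : nl ≤ 20 - nb)
    (d : PySem.Dict String String) :
    pvC 0 20
      (fun j =>
        if j < nb then pvSW j
        else if j < nb + nl then pvLedVal ls nb j
        else "NC") d
      = pvC (nb + nl) 20 (fun _ => "NC") (pvC nb (nb + nl) (pvLedVal ls nb) (pvC 0 nb pvSW d)) := by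
  simp only [pvC]
  rw [PySem.List.pyRange_one_append 0 nb 20 hnb0 hnb1, List.foldl_append,
      PySem.List.pyRange_one_append nb (nb + nl) 20 (by omega) (by omega), List.foldl_append]
  have h3 : ∀ X : PySem.Dict String String,
      (PySem.List.pyRange (nb + nl) 20 1).foldl (fun d j => d.insert (PySem.List.pyGetD pvIoPins j "")
        (if j < nb then pvSW j else if j < nb + nl then pvLedVal ls nb j else "NC")) X
      = (PySem.List.pyRange (nb + nl) 20 1).foldl (fun d j => d.insert (PySem.List.pyGetD pvIoPins j "") "NC") X := by
    intro X
    apply PySem.List.foldl_congr_mem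
    intro acc j hj
    rw [PySem.List.mem_pyRange_one] at hj
    rw [if_neg (by omega), if_neg (by omega)]
  have h2 : ∀ X : PySem.Dict String String,
      (PySem.List.pyRange nb (nb + nl) 1).foldl (fun d j => d.insert (PySem.List.pyGetD pvIoPins j "")
        (if j < nb then pvSW j else if j < nb + nl then pvLedVal ls nb j else "NC")) X
      = (PySem.List.pyRange nb (nb + nl) 1).foldl (fun d j => d.insert (PySem.List.pyGetD pvIoPins j "") (pvLedVal ls nb j)) X := by
    intro X
    apply PySem.List.foldl_congr_mem
    intro acc j hj
    rw [PySem.List.mem_pyRange_one] at hj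
    rw [if_neg (by omega), if_pos (by omega)]
  have h1 :
      (PySem.List.pyRange 0 nb 1).foldl (fun d j => d.insert (PySem.List.pyGetD pvIoPins j "")
        (if j < nb then pvSW j else if j < nb + nl then pvLedVal ls nb j else "NC")) d
      = (PySem.List.pyRange 0 nb 1).foldl (fun d j => d.insert (PySem.List.pyGetD pvIoPins j "") (pvSW j)) d := by
    apply PySem.List.foldl_congr_mem
    intro acc j hj
    rw [PySem.List.mem_pyRange_one] at hj
    rw [if_pos (by omega)]
  rw [h3, h2, h1]

-- pvSpecList only looks at V on indices ≥ j
lemma pv_spec_congr (pins : List String) : ∀ (j : Int) (V W : Int → String),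
    (∀ i, j ≤ i → V i = W i) → pvSpecList pins j V = pvSpecList pins j W := by
  induction pins with
  | nil => intro j V W _; rfl
  | cons p rest ih =>
    intro j V W h
    simp only [pvSpecList]
    rw [h j (le_refl j), ih (j + 1) V W (fun i hi => h i (by omega))]

-- Source B's recursion produces the index-determined value list
lemma pv_signals_spec (bc : Int) (pins : List String) : ∀ (j : Int) (ls : List (List (String × String))),
    0 ≤ j → pvSignals bc pins j ls = pvSpecList pins j (pvG bc (max j bc) ls) := by
  induction pins with
  | nil => intro j ls _; rfl
  | cons p rest ih =>
    intro j ls hj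
    by_cases h : j < bc
    · simp only [pvSignals, pvSpecList]
      rw [if_pos h]
      have hG : pvG bc (max j bc) ls j = "SW" ++ PySem.Int.toStr (j + 1) ++ "_SIG" := by
        simp only [pvG, pvSW]
        rw [if_pos h]
      have hmax : max (j + 1) bc = max j bc := by omega
      rw [hG, ih (j + 1) ls (by omega), hmax]
    · have hm : max j bc = j := by omega
      cases ls with
      | nil =>
        simp only [pvSignals, pvSpecList]
        rw [if_neg h]
        have hG : pvG bc (max j bc) [] j = "NC" := by
          simp only [pvG, hm, List.length_nil, Nat.cast_zero]
          rw [if_neg h, if_neg (by omega)]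
        rw [hG, ih (j + 1) [] (by omega)]
        congr 1
        apply pv_spec_congr
        intro i hi
        have hmax : max (j + 1) bc = j + 1 := by omega
        simp only [pvG, List.length_nil, Nat.cast_zero, hmax, hm]
        have hib : ¬ i < bc := by omega
        simp only [if_neg hib]
        rw [if_neg (by omega : ¬ i - (j+1) < (0:Int)), if_neg (by omega : ¬ i - j < (0:Int))]
      | cons led more =>
        simp only [pvSignals, pvSpecList]
        rw [if_neg h]
        have hG : pvG bc (max j bc) (led :: more) j
            = (PySem.Dict.mk led).getD "id" ("LED" ++ PySem.Int.toStr j) ++ "_SIG" := by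
          simp only [pvG, hm, pvLedVal, sub_self, PySem.List.pyGetD_zero_cons]
          rw [if_neg h, if_pos (by simp only [List.length_cons]; push_cast; omega)]
        rw [hG, ih (j + 1) more (by omega)]
        congr 1
        apply pv_spec_congr
        intro i hi
        have hmax : max (j + 1) bc = j + 1 := by omega
        simp only [pvG, hmax, hm]
        have hib : ¬ i < bc := by omega
        simp only [if_neg hib]
        have hlen : (((led :: more).length : Nat) : Int) = (more.length : Int) + 1 := by
          simp only [List.length_cons]; push_cast; ring
        by_cases hc : i - (j + 1) < ((more.length : Nat) : Int)
        · rw [if_pos hc, if_pos (by omega)]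
          simp only [pvLedVal]
          rw [pv_getD_cons led more (i - j) [] (by omega),
              (by omega : i - j - 1 = i - (j + 1))]
        · rw [if_neg hc, if_neg (by rw [hlen]; omega)]

-- inserting the spec list pair by pair is the canonical index sweep
lemma pv_fold_spec (pins : List String) : ∀ (j : Int) (V : Int → String) (d : PySem.Dict String String),
    0 ≤ j → pvIoPins.drop j.toNat = pins →
    (pvSpecList pins j V).foldl (fun d p => d.insert p.1 p.2) d = pvC j 20 V d := by
  induction pins with
  | nil =>
    intro j V d hj hdrop
    have hlen : pvIoPins.length = 20 := by decide
    have h20 : (20 : Int) ≤ j := by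
      have := List.drop_eq_nil_iff.mp hdrop
      omega
    simp only [pvSpecList, List.foldl_nil, pvC,
      PySem.List.pyRange_one_eq_nil h20, List.foldl_nil]
  | cons p rest ih =>
    intro j V d hj hdrop
    have hlen : pvIoPins.length = 20 := by decide
    have hlt : j.toNat < pvIoPins.length := by
      by_contra hc
      rw [List.drop_eq_nil_iff.mpr (by omega)] at hdrop
      simp at hdrop
    have hdrop' := hdrop
    rw [List.drop_eq_getElem_cons hlt] at hdrop'
    have hp : pvIoPins[j.toNat] = p := by
      have := List.cons.injEq (pvIoPins[j.toNat]) (pvIoPins.drop (j.toNat + 1)) p rest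
      rw [this] at hdrop'
      exact hdrop'.1
    have hrest : pvIoPins.drop (j + 1).toNat = rest := by
      have := List.cons.injEq (pvIoPins[j.toNat]) (pvIoPins.drop (j.toNat + 1)) p rest
      rw [this] at hdrop'
      rw [(by omega : (j + 1).toNat = j.toNat + 1)]
      exact hdrop'.2
    have hget : PySem.List.pyGetD pvIoPins j "" = p := by
      obtain ⟨n, rfl⟩ : ∃ n : Nat, j = (n : Int) := ⟨j.toNat, by omega⟩
      rw [PySem.List.pyGetD_natCast]
      rw [List.getD_eq_getElem _ _ (by simpa using hlt)]
      simpa using hp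
    simp only [pvSpecList, List.foldl_cons]
    rw [ih (j + 1) V _ (by omega) hrest]
    simp only [pvC]
    rw [PySem.List.pyRange_one_cons (by omega : j < 20), List.foldl_cons, hget]

-- assembling B: its dict is the canonical sweep with the combined value function
lemma pv_altB (bc : Int) (ls : List (List (String × String))) :
    (PySem.Dict.ofList (pvBaseItems ++ pvSignals bc pvIoPins 0 ls
        ++ [("PC6", "NC"), ("PB6", "NC"), ("PB7", "NC")]))
      = ((["PC6", "PB6", "PB7"].foldl (fun d p => d.insert p "NC")
          (pvC 0 20 (pvG bc (max bc 0) ls) pvBase))) := by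
  have hof : ∀ l : List (String × String),
      PySem.Dict.ofList l = l.foldl (fun d p => d.insert p.1 p.2) PySem.Dict.empty := fun _ => rfl
  rw [hof, List.foldl_append, List.foldl_append]
  have hbase : pvBaseItems.foldl (fun d p => d.insert p.1 p.2) PySem.Dict.empty = pvBase := rfl
  rw [hbase, pv_signals_spec bc pvIoPins 0 ls (le_refl 0),
      (by omega : max (0 : Int) bc = max bc 0),
      pv_fold_spec pvIoPins 0 (pvG bc (max bc 0) ls) pvBase (le_refl 0) (by rfl)]
  simp only [List.foldl_cons, List.foldl_nil]

-- the combined value function is A's segment function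
lemma pv_G_eq_F (bc : Int) (ls : List (List (String × String))) (j : Int)
    (h0 : 0 ≤ j) (h1 : j < 20) :
    pvG bc (max bc 0) ls j
      = (if j < min (max bc 0) 20 then pvSW j
         else if j < min (max bc 0) 20 + min ((ls.length : Int)) (20 - min (max bc 0) 20)
           then pvLedVal ls (min (max bc 0) 20) j
         else "NC") := by
  set m : Int := max bc 0 with hm
  set nb : Int := min m 20 with hnb
  have hL := Int.natCast_nonneg ls.length
  by_cases hb : j < bc
  · have : j < nb := by omega
    simp only [pvG]
    rw [if_pos hb, if_pos this]
  · have hnbj : ¬ j < nb := by omega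
    have hmnb : m = nb := by omega
    simp only [pvG]
    rw [if_neg hb, if_neg hnbj, hmnb]
    by_cases hc : j - nb < ((ls.length : Nat) : Int)
    · rw [if_pos hc, if_pos (by omega)]
    · rw [if_neg hc, if_neg (by omega)]

-- A reduced to the same canonical sweep
lemma pv_core (bc : Int) (led : Option (List (List (String × String)))) :
    (["PC6", "PB6", "PB7"].foldl (fun d p => d.insert p "NC")
      (pvWhileNC ((led.getD []).foldl pvLedStep
          ((PySem.List.pyRange 0 bc 1).foldl pvButtonStep (pvBase, (0 : Int)))).1
        ((led.getD []).foldl pvLedStep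
          ((PySem.List.pyRange 0 bc 1).foldl pvButtonStep (pvBase, (0 : Int)))).2)).items
    = generate_controller_pins_py_alt bc led := by
  unfold generate_controller_pins_py_alt
  dsimp only
  rw [pv_altB bc (led.getD [])]
  generalize led.getD [] = ls
  set nb : Int := min (max bc 0) 20 with hnb
  have hnb0 : 0 ≤ nb := by omega
  have hnb1 : nb ≤ 20 := by omega
  set nl : Int := min ((ls.length : Int)) (20 - nb) with hnl
  have hL := Int.natCast_nonneg ls.length
  have hnl0 : 0 ≤ nl := by omega
  have hnl1 : nl ≤ 20 - nb := by omega
  rw [pv_buttonI bc pvBase, ← hnb]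
  rw [pv_led ls nb _ hnb0 hnb1, ← hnl]
  rw [pv_while ((20 - (nb + nl)).toNat) (nb + nl) _ rfl]
  have hsweep : pvC 0 20 (pvG bc (max bc 0) ls) pvBase
      = pvC 0 20
          (fun j =>
            if j < nb then pvSW j
            else if j < nb + nl then pvLedVal ls nb j
            else "NC") pvBase := by
    simp only [pvC]
    apply PySem.List.foldl_congr_mem
    intro acc j hj
    rw [PySem.List.mem_pyRange_one] at hj
    rw [pv_G_eq_F bc ls j (by omega) (by omega)]
  rw [hsweep, pv_glue nb nl ls hnb0 hnb1 hnl0 hnl1]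

-- ===== VERDICT (by name: the statement is the Claim_ definition above) =====
theorem generate_controller_pins_py_spec : Claim_equal_generate_controller_pins_py := by
  intro bc led _
  unfold Spec_generate_controller_pins_py generate_controller_pins_py
  cases led with
  | none => exact pv_core bc none
  | some l =>
    cases l with
    | nil => exact pv_core bc (some [])
    | cons a t => exact pv_core bc (some (a :: t))
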